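-- pv_equiv track=rewrite | github.com/thirupathireddy665/crossbeam | src/bustle_generated_properties.py | is_negative
-- ===== SOURCE A (Python) =====
-- AllTrue = -1
--
-- Mixed = 0
--
-- AllFalse = 1
--
-- def is_negative(inputs):
--     is_true_present = False
--     is_false_present = False
--     for program_input in inputs:
--         if program_input < 0:
--             is_true_present = True
--         else:
--             is_false_present = True
--
--     if is_true_present and is_false_present:
--         return Mixed
--     elif is_true_present:
--         return AllTrue
--     else:
--         return AllFalse
-- ===== SOURCE B (Python) =====
-- AllTrue = -1
--
-- Mixed = 0
--
-- AllFalse = 1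
--
-- def is_negative(inputs):
--     if not inputs:
--         return AllFalse
--     hi = max(inputs)
--     if hi < 0:
--         return AllTrue
--     lo = min(inputs)
--     if lo >= 0:
--         return AllFalse
--     return Mixed
-- ===== Notes on version B (the rewrite author's own statement) =====
-- stated objective: alternative
-- what changed: Classifies via the list's extrema instead of scanning for presence flags: empty list is AllFalse, max < 0 means AllTrue, min >= 0 means AllFalse, otherwise Mixed.
import Mathlib
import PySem

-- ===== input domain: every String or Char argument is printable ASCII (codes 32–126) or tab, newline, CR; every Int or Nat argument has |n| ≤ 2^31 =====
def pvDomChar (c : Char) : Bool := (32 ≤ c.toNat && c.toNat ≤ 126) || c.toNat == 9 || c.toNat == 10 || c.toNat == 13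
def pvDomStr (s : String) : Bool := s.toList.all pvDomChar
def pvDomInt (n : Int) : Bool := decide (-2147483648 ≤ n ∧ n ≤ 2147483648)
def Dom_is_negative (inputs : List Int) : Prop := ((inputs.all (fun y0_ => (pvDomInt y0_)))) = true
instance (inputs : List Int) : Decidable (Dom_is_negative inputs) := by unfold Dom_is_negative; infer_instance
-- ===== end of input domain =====

-- B classifies by the list's extrema (empty → 1, max < 0 → -1, min ≥ 0 → 1, else 0) instead of A's flag-setting scan; same values everywhere.
-- ===== PORT A =====
def is_negative (inputs : List Int) : Int :=
  let st := inputs.foldl (fun (st : Bool × Bool) program_input =>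
    if program_input < 0 then (true, st.2) else (st.1, true)) (false, false)
  if st.1 && st.2 then 0
  else if st.1 then -1
  else 1

-- ===== PORT B =====
def is_negative_alt (inputs : List Int) : Int :=
  match PySem.List.max? inputs (fun x => x) with
  | none => 1
  | some hi =>
    if hi < 0 then -1
    else
      match PySem.List.min? inputs (fun x => x) with
      | none => 1
      | some lo => if lo ≥ 0 then 1 else 0

-- ===== PRECONDITION & SPEC =====
def Spec_is_negative (inputs : List Int) (out : Int) : Prop := out = is_negative_alt inputs
instance (inputs : List Int) (out : Int) : Decidable (Spec_is_negative inputs out) := by unfold Spec_is_negative; infer_instance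

-- ===== CLAIM (what is proved, stated in full; the proofs are below) =====
def Claim_equal_is_negative : Prop := ∀ (inputs : List Int), Dom_is_negative inputs → Spec_is_negative inputs (is_negative inputs)

-- ===== LEMMAS AND PROOFS =====
theorem flags_eq (inputs : List Int) (a b : Bool) :
    inputs.foldl (fun (st : Bool × Bool) program_input =>
      if program_input < 0 then (true, st.2) else (st.1, true)) (a, b)
    = (a || inputs.any (fun x => decide (x < 0)), b || inputs.any (fun x => decide (x ≥ 0))) := by
  induction inputs generalizing a b with
  | nil => simp
  | cons x xs ih =>
    simp only [List.foldl_cons, List.any_cons]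
    by_cases h : x < 0
    · have h2 : ¬ x ≥ 0 := by omega
      simp [h, h2, ih]
    · have h2 : x ≥ 0 := by omega
      simp [h, h2, ih]

-- ===== VERDICT (by name: the statement is the Claim_ definition above) =====
theorem is_negative_spec : Claim_equal_is_negative := by
  intro inputs _
  unfold Spec_is_negative is_negative is_negative_alt
  rw [flags_eq]
  simp only [Bool.false_or]
  cases hmax : PySem.List.max? inputs (fun x => x) with
  | none =>
    have : inputs = [] := (PySem.List.max?_eq_none_iff _ _).1 hmax
    subst this; simp
  | some hi =>
    have hmem := PySem.List.max?_mem hmax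
    have hismax := PySem.List.max?_isMax hmax
    cases hmin : PySem.List.min? inputs (fun x => x) with
    | none =>
      have : inputs = [] := (PySem.List.min?_eq_none_iff _ _).1 hmin
      subst this; simp at hmem
    | some lo =>
      have lmem := PySem.List.min?_mem hmin
      have hismin := PySem.List.min?_isMin hmin
      by_cases hhi : hi < 0
      · have hneg : inputs.any (fun x => decide (x < 0)) = true := by
          simp only [List.any_eq_true]; exact ⟨hi, hmem, by simpa using hhi⟩
        have hnon : inputs.any (fun x => decide (x ≥ 0)) = false := by
          simp only [List.any_eq_false]; intro x hx
          have := hismax x hx; simp only [decide_eq_true_eq] at *; omega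
        simp [hneg, hnon, hhi]
      · by_cases hlo : lo ≥ 0
        · have hneg : inputs.any (fun x => decide (x < 0)) = false := by
            simp only [List.any_eq_false]; intro x hx
            have := hismin x hx; simp only [decide_eq_true_eq] at *; omega
          simp [hneg, hhi, hlo]
        · have hneg : inputs.any (fun x => decide (x < 0)) = true := by
            simp only [List.any_eq_true]; exact ⟨lo, lmem, by simp; omega⟩
          have hnon : inputs.any (fun x => decide (x ≥ 0)) = true := by
            simp only [List.any_eq_true]; exact ⟨hi, hmem, by simp; omega⟩
          simp [hneg, hnon, hhi, hlo]
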